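-- pv_equiv track=rewrite | github.com/gaveron18/Proba1 | server.py | get_active_runway
-- ===== SOURCE A (Python) =====
-- RUNWAYS  = [('03', 30), ('21', 210)]
--
-- PREFERRED = '21'
--
-- PREFERRED_HEADING = 210
--
-- def angle_diff(a, b):
--     d = abs(a - b) % 360
--     return 360 - d if d > 180 else d
--
-- def get_active_runway(wind_dir, wind_spd, is_vrb):
--     if is_vrb or wind_spd == 0 or wind_dir is None:
--         return PREFERRED, PREFERRED_HEADING, True, bool(is_vrb)
--     best_name, best_heading, best_diff = None, None, 999
--     for name, heading in RUNWAYS: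
--         diff = angle_diff(wind_dir, heading)
--         if diff < best_diff:
--             best_diff = diff
--             best_name, best_heading = name, heading
--     return best_name, best_heading, False, False
-- ===== SOURCE B (Python) =====
-- RUNWAYS  = [('03', 30), ('21', 210)]
--
-- PREFERRED = '21'
--
-- PREFERRED_HEADING = 210
--
-- def angle_diff(a, b):
--     d = abs(a - b) % 360
--     return 360 - d if d > 180 else d
--
-- def get_active_runway(wind_dir, wind_spd, is_vrb):
--     if is_vrb or wind_spd == 0 or wind_dir is None:
--         return PREFERRED, PREFERRED_HEADING, True, bool(is_vrb)
--     # The two runways are reciprocal (30 and 210, 180 degrees apart), so the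
--     # angle differences sum to 180: one comparison decides, no min-scan needed.
--     if angle_diff(wind_dir, 30) <= 90:
--         return '03', 30, False, False
--     return '21', 210, False, False
-- ===== Notes on version B (the rewrite author's own statement) =====
-- stated objective: simpler
-- what changed: Replaced the min-scan over the runway list with a single closed-form comparison: the two runways are reciprocal, so angle_diff(wind_dir, 30) <= 90 decides '03' vs '21' directly.
import Mathlib
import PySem

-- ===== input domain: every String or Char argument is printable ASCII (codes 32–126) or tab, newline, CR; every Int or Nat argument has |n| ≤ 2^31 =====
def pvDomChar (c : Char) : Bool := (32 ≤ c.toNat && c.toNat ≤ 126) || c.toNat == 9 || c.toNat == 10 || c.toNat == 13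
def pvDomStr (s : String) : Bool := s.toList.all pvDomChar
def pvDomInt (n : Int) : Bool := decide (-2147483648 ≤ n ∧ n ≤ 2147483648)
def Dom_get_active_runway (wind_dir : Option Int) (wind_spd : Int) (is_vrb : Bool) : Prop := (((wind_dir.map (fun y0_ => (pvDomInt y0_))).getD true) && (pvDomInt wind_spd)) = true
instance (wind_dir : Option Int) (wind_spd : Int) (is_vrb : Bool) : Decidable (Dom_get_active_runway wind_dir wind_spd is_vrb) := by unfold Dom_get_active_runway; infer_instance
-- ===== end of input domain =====

-- B simplifies A: the two runways are reciprocal (180° apart), so a single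
-- closed-form comparison angle_diff(wind_dir, 30) ≤ 90 replaces A's min-scan.

-- ===== PORT A =====
def RUNWAYS : List (String × Int) := [("03", 30), ("21", 210)]

def angle_diff (a b : Int) : Int :=
  let d := PySem.Int.mod |a - b| 360
  if d > 180 then 360 - d else d

def get_active_runway (wind_dir : Option Int) (wind_spd : Int) (is_vrb : Bool) : String × Int × Bool × Bool :=
  match wind_dir with
  | none => ("21", 210, true, is_vrb)
  | some w =>
    if is_vrb || wind_spd == 0 then ("21", 210, true, is_vrb)
    else
      -- Python starts with best_name/best_heading = None; 999 > any angle_diff,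
      -- so they are always set; Option with getD mirrors the None initial state.
      let st := RUNWAYS.foldl
        (fun (st : Option String × Option Int × Int) rw =>
          let diff := angle_diff w rw.2
          if diff < st.2.2 then (some rw.1, some rw.2, diff) else st)
        (none, none, 999)
      (st.1.getD "", st.2.1.getD 0, false, false)

-- ===== PORT B =====
def angle_diff_alt (a b : Int) : Int :=
  let d := PySem.Int.mod |a - b| 360
  if d > 180 then 360 - d else d

def get_active_runway_alt (wind_dir : Option Int) (wind_spd : Int) (is_vrb : Bool) : String × Int × Bool × Bool :=
  match wind_dir with
  | none => ("21", 210, true, is_vrb)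
  | some w =>
    if is_vrb || wind_spd == 0 then ("21", 210, true, is_vrb)
    else if angle_diff_alt w 30 ≤ 90 then ("03", 30, false, false)
    else ("21", 210, false, false)

-- ===== PRECONDITION & SPEC =====
def Spec_get_active_runway (wind_dir : Option Int) (wind_spd : Int) (is_vrb : Bool) (out : String × Int × Bool × Bool) : Prop := out = get_active_runway_alt wind_dir wind_spd is_vrb
instance (wind_dir : Option Int) (wind_spd : Int) (is_vrb : Bool) (out : String × Int × Bool × Bool) : Decidable (Spec_get_active_runway wind_dir wind_spd is_vrb out) := by unfold Spec_get_active_runway; infer_instance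

-- ===== CLAIM (what is proved, stated in full; the proofs are below) =====
def Claim_equal_get_active_runway : Prop := ∀ (wind_dir : Option Int) (wind_spd : Int) (is_vrb : Bool), Dom_get_active_runway wind_dir wind_spd is_vrb → Spec_get_active_runway wind_dir wind_spd is_vrb (get_active_runway wind_dir wind_spd is_vrb)

-- ===== LEMMAS AND PROOFS =====
theorem angle_diff_complement (w : Int) :
    angle_diff w 30 + angle_diff w 210 = 180 := by
  simp only [angle_diff, PySem.Int.mod_eq_emod_of_pos (by norm_num : (0:Int) < 360)]
  rcases abs_cases (w - 30) with ⟨h1, _⟩ | ⟨h1, _⟩ <;>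
    rcases abs_cases (w - 210) with ⟨h2, _⟩ | ⟨h2, _⟩ <;>
    rw [h1, h2] <;> omega

theorem angle_diff_nonneg_le (w : Int) :
    0 ≤ angle_diff w 30 ∧ angle_diff w 30 ≤ 180 := by
  simp only [angle_diff, PySem.Int.mod_eq_emod_of_pos (by norm_num : (0:Int) < 360)]
  omega

-- ===== VERDICT (by name: the statement is the Claim_ definition above) =====
theorem get_active_runway_spec : Claim_equal_get_active_runway := by
  intro wind_dir wind_spd is_vrb _
  unfold Spec_get_active_runway
  match wind_dir with
  | none => rfl
  | some w =>
    simp only [get_active_runway, get_active_runway_alt]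
    by_cases h : (is_vrb || wind_spd == 0) = true
    · simp [h]
    · simp only [h, if_neg, Bool.not_eq_true] at *
      simp only [RUNWAYS, List.foldl]
      have hc := angle_diff_complement w
      have hb := angle_diff_nonneg_le w
      have hd : angle_diff_alt w 30 = angle_diff w 30 := rfl
      rw [hd]
      split_ifs with h1 h2 h3 h3 h2 h3 h3 <;> simp_all <;> omega
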